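-- pv_equiv track=rewrite | github.com/Klutzleo/TBA-App | backend/magic_logic.py | get_spell_die
-- ===== SOURCE A (Python) =====
-- def get_spell_die(level, slot):
--     spell_table = {
--         1: ["1d6", None, None, None, None],
--         3: ["1d8", "1d6", None, None, None],
--         5: ["1d10", "1d8", "1d6", None, None],
--         7: ["1d12", "1d10", "1d8", "1d8", None],
--         9: ["2d8", "1d12", "1d10", "1d10", "1d10"],
--         10: ["2d8", "1d12", "2d6", "1d10", "1d12"]
--     }
--     for lvl in sorted(spell_table.keys(), reverse=True):
--         if level >= lvl:
--             return spell_table[lvl][slot]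
--     return "1d6"  # fallback
-- ===== SOURCE B (Python) =====
-- import bisect
--
-- _THRESHOLDS = [1, 3, 5, 7, 9, 10]
-- _ROWS = [
--     ["1d6", None, None, None, None],
--     ["1d8", "1d6", None, None, None],
--     ["1d10", "1d8", "1d6", None, None],
--     ["1d12", "1d10", "1d8", "1d8", None],
--     ["2d8", "1d12", "1d10", "1d10", "1d10"],
--     ["2d8", "1d12", "2d6", "1d10", "1d12"],
-- ]
--
--
-- def get_spell_die(level, slot):
--     idx = bisect.bisect_right(_THRESHOLDS, level)
--     if idx == 0:
--         return "1d6"  # below every threshold: fallback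
--     return _ROWS[idx - 1][slot]
-- ===== Notes on version B (the rewrite author's own statement) =====
-- stated objective: idiomatic
-- what changed: Replaces the descending linear scan over sorted dict keys with a precomputed sorted thresholds table and bisect.bisect_right to find the bracket in one binary-search step.
import Mathlib
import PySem

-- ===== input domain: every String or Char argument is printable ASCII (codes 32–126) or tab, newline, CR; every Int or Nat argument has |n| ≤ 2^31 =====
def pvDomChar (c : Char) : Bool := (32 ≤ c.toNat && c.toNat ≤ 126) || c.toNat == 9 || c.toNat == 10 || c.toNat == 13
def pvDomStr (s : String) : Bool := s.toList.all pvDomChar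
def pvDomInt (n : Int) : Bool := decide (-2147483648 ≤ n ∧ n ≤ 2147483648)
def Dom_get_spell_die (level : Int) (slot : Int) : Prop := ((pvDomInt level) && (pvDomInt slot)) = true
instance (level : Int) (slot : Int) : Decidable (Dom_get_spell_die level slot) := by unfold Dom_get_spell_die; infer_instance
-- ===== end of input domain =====

-- B replaces A's descending scan over the sorted dict keys by bisect_right on a
-- precomputed thresholds table (more idiomatic); equivalence of return values is proved.

-- ===== PORT A =====
-- the dict literal, in insertion order
def pvTableA : PySem.Dict Int (List (Option String)) :=
  PySem.Dict.ofList
    [ (1,  [some "1d6",  none,        none,        none,        none]),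
      (3,  [some "1d8",  some "1d6",  none,        none,        none]),
      (5,  [some "1d10", some "1d8",  some "1d6",  none,        none]),
      (7,  [some "1d12", some "1d10", some "1d8",  some "1d8",  none]),
      (9,  [some "2d8",  some "1d12", some "1d10", some "1d10", some "1d10"]),
      (10, [some "2d8",  some "1d12", some "2d6",  some "1d10", some "1d12"]) ]

-- the for-loop with its early return; pyGet? = none is Python's IndexError (excluded by Pre_)
def pvLoopA (level : Int) (slot : Int) : List Int → Option String
  | [] => some "1d6"  -- fallback
  | lvl :: rest =>
      if level ≥ lvl then
        match PySem.List.pyGet? (pvTableA.getD lvl []) slot with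
        | some v => v
        | none => none
      else pvLoopA level slot rest

def get_spell_die (level : Int) (slot : Int) : Option String :=
  pvLoopA level slot (PySem.List.sorted pvTableA.keys id true)

-- ===== PORT B =====
def pvThresholds : List Int := [1, 3, 5, 7, 9, 10]

def pvRows : List (List (Option String)) :=
  [ [some "1d6",  none,        none,        none,        none],
    [some "1d8",  some "1d6",  none,        none,        none],
    [some "1d10", some "1d8",  some "1d6",  none,        none],
    [some "1d12", some "1d10", some "1d8",  some "1d8",  none],
    [some "2d8",  some "1d12", some "1d10", some "1d10", some "1d10"],
    [some "2d8",  some "1d12", some "2d6",  some "1d10", some "1d12"] ]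

def get_spell_die_alt (level : Int) (slot : Int) : Option String :=
  let idx := PySem.List.bisectRight pvThresholds level
  if idx = 0 then some "1d6"  -- below every threshold: fallback
  else
    match PySem.List.pyGet? (pvRows.getD (idx - 1) []) slot with
    | some v => v
    | none => none

-- ===== PRECONDITION & SPEC =====
-- Pre_ excludes exactly the inputs where A raises IndexError: a slot outside
-- the 5-entry row when level ≥ 1 (for level < 1 A returns the fallback without indexing).
def Pre_get_spell_die (level : Int) (slot : Int) : Prop :=
  level < 1 ∨ PySem.Raise.InRange 5 slot
instance (level : Int) (slot : Int) : Decidable (Pre_get_spell_die level slot) := by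
  unfold Pre_get_spell_die; infer_instance

def pvWitness_get_spell_die : Int × Int := (5, 2)

def Spec_get_spell_die (level : Int) (slot : Int) (out : Option String) : Prop := out = get_spell_die_alt level slot
instance (level : Int) (slot : Int) (out : Option String) : Decidable (Spec_get_spell_die level slot out) := by unfold Spec_get_spell_die; infer_instance

-- ===== CLAIM (what is proved, stated in full; the proofs are below) =====
def Claim_equal_get_spell_die : Prop := ∀ (level : Int) (slot : Int), Dom_get_spell_die level slot → Pre_get_spell_die level slot → Spec_get_spell_die level slot (get_spell_die level slot)

-- ===== LEMMAS AND PROOFS =====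

theorem pvKeysSorted : PySem.List.sorted pvTableA.keys id true = [10, 9, 7, 5, 3, 1] := by
  decide

-- ===== VERDICT (by name: the statement is the Claim_ definition above) =====
theorem get_spell_die_spec : Claim_equal_get_spell_die := by
  intro level slot _ _
  unfold Spec_get_spell_die get_spell_die get_spell_die_alt
  rw [pvKeysSorted]
  rcases lt_or_ge level 1 with h1 | h1
  · simp [pvLoopA, pvThresholds,
      PySem.List.bisectRight, PySem.List.bisectRightLoop,
      show level < 7 by omega, show level < 3 by omega, h1,
      show ¬ level ≥ 1 by omega, show ¬ level ≥ 3 by omega, show ¬ level ≥ 5 by omega,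
      show ¬ level ≥ 7 by omega, show ¬ level ≥ 9 by omega, show ¬ level ≥ 10 by omega]
  · rcases lt_or_ge level 3 with h2 | h2
    · simp [pvLoopA, pvThresholds, pvRows,
        PySem.List.bisectRight, PySem.List.bisectRightLoop,
        show level < 7 by omega, h2, show ¬ level < 1 by omega, h1,
        show ¬ level ≥ 3 by omega, show ¬ level ≥ 5 by omega,
        show ¬ level ≥ 7 by omega, show ¬ level ≥ 9 by omega, show ¬ level ≥ 10 by omega]
      rw [show pvTableA.getD 1 [] = [some "1d6", none, none, none, none] from by decide]
    · rcases lt_or_ge level 5 with h3 | h3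
      · simp [pvLoopA, pvThresholds, pvRows,
          PySem.List.bisectRight, PySem.List.bisectRightLoop,
          show level < 7 by omega, show ¬ level < 3 by omega, h3, h2,
          show ¬ level ≥ 5 by omega,
          show ¬ level ≥ 7 by omega, show ¬ level ≥ 9 by omega, show ¬ level ≥ 10 by omega]
        rw [show pvTableA.getD 3 [] = [some "1d8", some "1d6", none, none, none] from by decide]
      · rcases lt_or_ge level 7 with h4 | h4
        · simp [pvLoopA, pvThresholds, pvRows,
            PySem.List.bisectRight, PySem.List.bisectRightLoop,
            h4, show ¬ level < 3 by omega, show ¬ level < 5 by omega, h3,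
            show ¬ level ≥ 7 by omega, show ¬ level ≥ 9 by omega, show ¬ level ≥ 10 by omega]
          rw [show pvTableA.getD 5 [] = [some "1d10", some "1d8", some "1d6", none, none] from by decide]
        · rcases lt_or_ge level 9 with h5 | h5
          · simp [pvLoopA, pvThresholds, pvRows,
              PySem.List.bisectRight, PySem.List.bisectRightLoop,
              show ¬ level < 7 by omega, show level < 10 by omega, h5, h4,
              show ¬ level ≥ 9 by omega, show ¬ level ≥ 10 by omega]
            rw [show pvTableA.getD 7 [] = [some "1d12", some "1d10", some "1d8", some "1d8", none] from by decide]
          · rcases lt_or_ge level 10 with h6 | h6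
            · simp [pvLoopA, pvThresholds, pvRows,
                PySem.List.bisectRight, PySem.List.bisectRightLoop,
                show ¬ level < 7 by omega, h6, show ¬ level < 9 by omega, h5,
                show ¬ level ≥ 10 by omega]
              rw [show pvTableA.getD 9 [] = [some "2d8", some "1d12", some "1d10", some "1d10", some "1d10"] from by decide]
            · simp [pvLoopA, pvThresholds, pvRows,
                PySem.List.bisectRight, PySem.List.bisectRightLoop,
                show ¬ level < 7 by omega, show ¬ level < 10 by omega, h6]
              rw [show pvTableA.getD 10 [] = [some "2d8", some "1d12", some "2d6", some "1d10", some "1d12"] from by decide]
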